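-- pv_equiv track=rewrite | github.com/Dekker1/RectEuler | docker-files/worker/code/SplittingStrategies.py | removeMaxElement
-- ===== SOURCE A (Python) =====
-- def removeMaxElement(reduced):
--     countDict = {}
--     for k, v in reduced.items():
--         for element in v:
--             key = element
--             if isinstance(key, (list, tuple)):
--                 key = tuple(key)
--             if key not in countDict:
--                 countDict[key] = [k]
--             else:
--                 countDict[key].append(k)
--     maxCount = 0
--     maxElement = None
--     for k, v in countDict.items():
--         if len(v) > maxCount:
--             maxElement = k
--             maxCount = len(v)
--
--     setsToDeleteElementFrom = countDict[maxElement]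
--     for s in setsToDeleteElementFrom:
--         if isinstance(maxElement, tuple):
--             maxElement = list(maxElement)
--         reduced[s].remove(maxElement)
--
--     newdict = {}
--     for s in setsToDeleteElementFrom:
--         newdict[s] = [maxElement]
--     return reduced, newdict
-- ===== SOURCE B (Python) =====
-- def removeMaxElement(reduced):
--     # One frequency counter instead of per-element occurrence lists; second pass
--     # filters all copies of the winner out of each affected set in one go.
--     counts = {}
--     for v in reduced.values():
--         for element in v:
--             key = tuple(element)
--             counts[key] = counts.get(key, 0) + 1
--     maxCount = 0
--     maxElement = None
--     for key, c in counts.items():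
--         if c > maxCount:
--             maxElement = key
--             maxCount = c
--     target = list(maxElement)
--     newdict = {}
--     for k, v in reduced.items():
--         if target in v:
--             v[:] = [e for e in v if e != target]
--             newdict[k] = [target]
--     return reduced, newdict
-- ===== Notes on version B (the rewrite author's own statement) =====
-- stated objective: alternative
-- what changed: B replaces A's dict of per-element occurrence lists (and its one-removal-per-occurrence loop) by a plain frequency counter plus a single second pass that filters every copy of the winning element out of each affected set at once.
import Mathlib
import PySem

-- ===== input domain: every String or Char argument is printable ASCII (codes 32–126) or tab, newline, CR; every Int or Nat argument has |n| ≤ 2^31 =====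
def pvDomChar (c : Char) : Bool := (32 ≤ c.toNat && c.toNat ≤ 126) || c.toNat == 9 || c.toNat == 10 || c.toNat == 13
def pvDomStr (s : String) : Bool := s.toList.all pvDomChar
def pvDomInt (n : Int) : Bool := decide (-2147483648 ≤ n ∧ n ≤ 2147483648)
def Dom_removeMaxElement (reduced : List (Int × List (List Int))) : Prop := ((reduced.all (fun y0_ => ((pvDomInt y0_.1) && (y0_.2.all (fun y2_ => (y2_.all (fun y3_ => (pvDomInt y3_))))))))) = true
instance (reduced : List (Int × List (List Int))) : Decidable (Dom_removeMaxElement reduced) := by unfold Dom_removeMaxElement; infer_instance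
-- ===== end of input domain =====

-- B replaces A's dict of per-element occurrence lists by a plain frequency counter and
-- removes all copies of the winning element from each affected set with one filter pass
-- (objective: simpler/alternative; same asymptotic cost). Python A mutates `reduced` in
-- place and returns it; Python B performs the same in-place mutation, and the theorems
-- here are about the returned value.

-- ===== PORT A =====
def removeMaxElement (reduced : List (Int × List (List Int))) :
    (List (Int × List (List Int))) × (List (Int × List (List Int))) :=
  let countDict : PySem.Dict (List Int) (List Int) :=
    reduced.foldl (fun d kv =>
      kv.2.foldl (fun d element =>
        if d.contains element = false then d.insert element [kv.1]
        else d.modify element [] (fun l => l ++ [kv.1])) d) PySem.Dict.empty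
  let mr : Int × Option (List Int) :=
    countDict.items.foldl (fun acc kv =>
      if (kv.2.length : Int) > acc.1 then ((kv.2.length : Int), some kv.1) else acc)
      (0, none)
  match mr.2 with
  | none => (reduced, [])          -- maxElement is None: countDict[None] raises KeyError (excluded by Pre_)
  | some maxElement =>
    match countDict.get? maxElement with
    | none => (reduced, [])        -- KeyError (unreachable under Pre_)
    | some setsToDeleteElementFrom =>
      let reduced' : PySem.Dict Int (List (List Int)) :=
        setsToDeleteElementFrom.foldl (fun d s =>
          -- reduced[s].remove(maxElement); the element is always present here, so
          -- `getD` never supplies its default under Pre_ (no ValueError)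
          d.modify s [] (fun v => (PySem.List.remove? v maxElement).getD v))
          (PySem.Dict.mk reduced)
      let newdict : PySem.Dict Int (List (List Int)) :=
        setsToDeleteElementFrom.foldl (fun nd s => nd.insert s [maxElement]) PySem.Dict.empty
      (reduced'.items, newdict.items)

-- ===== PORT B =====
def removeMaxElement_alt (reduced : List (Int × List (List Int))) :
    (List (Int × List (List Int))) × (List (Int × List (List Int))) :=
  let counts : PySem.Dict (List Int) Int :=
    reduced.foldl (fun d kv =>
      kv.2.foldl (fun d element => d.insert element (d.getD element 0 + 1)) d)
      PySem.Dict.empty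
  let mr : Int × Option (List Int) :=
    counts.items.foldl (fun acc kv =>
      if kv.2 > acc.1 then (kv.2, some kv.1) else acc) (0, none)
  match mr.2 with
  | none => (reduced, [])          -- maxElement is None: list(None) raises TypeError (excluded by Pre_)
  | some target =>
    reduced.foldl (fun acc kv =>
      if target ∈ kv.2 then
        (acc.1 ++ [(kv.1, kv.2.filter (fun e => e != target))], acc.2 ++ [(kv.1, [target])])
      else (acc.1 ++ [kv], acc.2)) ([], [])

-- ===== PRECONDITION & SPEC =====
-- Pre_ excludes (a) association lists with duplicate keys, which do not denote a Python
-- dict input (dict() collapses them, so the list is not the input A actually sees), and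
-- (b) inputs all of whose value lists are empty, on which A raises KeyError.
def Pre_removeMaxElement (reduced : List (Int × List (List Int))) : Prop :=
  (reduced.map Prod.fst).Nodup ∧ ∃ kv ∈ reduced, kv.2 ≠ []
instance (reduced : List (Int × List (List Int))) : Decidable (Pre_removeMaxElement reduced) := by
  unfold Pre_removeMaxElement; infer_instance

def pvWitness_removeMaxElement : (List (Int × List (List Int))) := [(1, [[2]]), (2, [[2], [3]])]

def Spec_removeMaxElement (reduced : List (Int × List (List Int))) (out : (List (Int × List (List Int))) × (List (Int × List (List Int)))) : Prop := out = removeMaxElement_alt reduced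
instance (reduced : List (Int × List (List Int))) (out : (List (Int × List (List Int))) × (List (Int × List (List Int)))) : Decidable (Spec_removeMaxElement reduced out) := by unfold Spec_removeMaxElement; infer_instance

-- ===== CLAIM (what is proved, stated in full; the proofs are below) =====
def Claim_equal_removeMaxElement : Prop := ∀ (reduced : List (Int × List (List Int))), Dom_removeMaxElement reduced → Pre_removeMaxElement reduced → Spec_removeMaxElement reduced (removeMaxElement reduced)

-- ===== LEMMAS AND PROOFS =====

-- occurrence list and element list
def pvOcc (reduced : List (Int × List (List Int))) : List (List Int × Int) :=
  reduced.flatMap (fun kv => kv.2.map (fun e => (e, kv.1)))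
def pvE (reduced : List (Int × List (List Int))) : List (List Int) :=
  reduced.flatMap (fun kv => kv.2)
def pvGrp (reduced : List (Int × List (List Int))) (t : List Int) : List Int :=
  ((pvOcc reduced).filter (fun p => p.1 == t)).map (fun p => p.2)

lemma stepA_eq (d : PySem.Dict (List Int) (List Int)) (e : List Int) (k : Int) :
    (if d.contains e = false then d.insert e [k] else d.modify e [] (fun l => l ++ [k]))
    = d.modify e [] (fun l => l ++ [k]) := by
  by_cases h : d.contains e = false
  · simp [h, PySem.Dict.modify, PySem.Dict.getD_of_not_contains d [] h]
  · simp [h]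

lemma countA_eq (reduced : List (Int × List (List Int))) :
    (reduced.foldl (fun d kv =>
      kv.2.foldl (fun d element =>
        if d.contains element = false then d.insert element [kv.1]
        else d.modify element [] (fun l => l ++ [kv.1])) d) PySem.Dict.empty)
    = (pvOcc reduced).foldl (fun d p => d.modify p.1 [] (fun l => l ++ [p.2])) PySem.Dict.empty := by
  rw [pvOcc, List.foldl_flatMap]
  refine PySem.List.foldl_congr_mem _ _ _ _ ?_
  intro d kv _
  rw [List.foldl_map]
  exact PySem.List.foldl_congr_mem _ _ _ _ (fun d e _ => stepA_eq d e kv.1)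

lemma countB_eq (reduced : List (Int × List (List Int))) :
    (reduced.foldl (fun d kv =>
      kv.2.foldl (fun d element => d.insert element (d.getD element 0 + 1)) d) PySem.Dict.empty)
    = PySem.Dict.counter (pvE reduced) := by
  rw [← PySem.Dict.foldl_insert_getD_add_one_eq_counter, pvE, List.foldl_flatMap]

lemma occ_map_fst (reduced : List (Int × List (List Int))) :
    (pvOcc reduced).map Prod.fst = pvE reduced := by
  simp only [pvOcc, pvE, List.map_flatMap, List.map_map]
  refine List.flatMap_congr ?_
  intro kv _
  simp [Function.comp_def]

lemma grp_len (reduced : List (Int × List (List Int))) (k : List Int) :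
    (pvGrp reduced k).length = (pvE reduced).count k := by
  rw [pvGrp, List.length_map, ← occ_map_fst, List.count_eq_countP, List.countP_map,
    ← List.countP_eq_length_filter]
  rfl

lemma grp_eq (reduced : List (Int × List (List Int))) (t : List Int) :
    pvGrp reduced t = reduced.flatMap (fun kv => List.replicate (kv.2.count t) kv.1) := by
  simp only [pvGrp, pvOcc, List.filter_flatMap, List.map_flatMap]
  refine List.flatMap_congr ?_
  intro kv _
  rw [List.filter_map, List.map_map]
  have : ((fun p : List Int × Int => p.1 == t) ∘ fun e => (e, kv.1)) = fun e => e == t := rfl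
  rw [this]
  have : ((fun p : List Int × Int => p.2) ∘ fun e => (e, kv.1)) = fun _ => kv.1 := rfl
  rw [this, List.map_const', List.count_eq_length_filter]

lemma keysA_eq (reduced : List (Int × List (List Int))) :
    ((pvOcc reduced).foldl (fun d p => d.modify p.1 [] (fun l => l ++ [p.2]))
      PySem.Dict.empty).keys = PySem.Set.ofList (pvE reduced) := by
  rw [PySem.Dict.keys_foldl_modify_key (key := Prod.fst) (f := fun _ p l => l ++ [p.2]),
    occ_map_fst]
  rfl

lemma nodup_keysA (reduced : List (Int × List (List Int))) :
    ((pvOcc reduced).foldl (fun d p => d.modify p.1 [] (fun l => l ++ [p.2]))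
      PySem.Dict.empty).keys.Nodup :=
  PySem.Dict.nodup_keys_foldl_modify_key _ Prod.fst _ _ _ (by simp [PySem.Dict.empty, PySem.Dict.keys])

lemma getDA_eq (reduced : List (Int × List (List Int))) (c : List Int) :
    ((pvOcc reduced).foldl (fun d p => d.modify p.1 [] (fun l => l ++ [p.2]))
      PySem.Dict.empty).getD c [] = pvGrp reduced c := by
  rw [PySem.Dict.getD_foldl_modify_append, pvGrp]
  simp [PySem.Dict.getD_empty]

lemma itemsA_eq (reduced : List (Int × List (List Int))) :
    ((pvOcc reduced).foldl (fun d p => d.modify p.1 [] (fun l => l ++ [p.2]))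
      PySem.Dict.empty).items
    = (PySem.Set.ofList (pvE reduced)).map (fun k => (k, pvGrp reduced k)) := by
  rw [PySem.Dict.items_eq_map_keys _ (nodup_keysA reduced) [], keysA_eq]
  exact List.map_congr_left (fun k _ => by rw [getDA_eq])

lemma get?A_eq (reduced : List (Int × List (List Int))) (t : List Int) (h : t ∈ pvE reduced) :
    ((pvOcc reduced).foldl (fun d p => d.modify p.1 [] (fun l => l ++ [p.2]))
      PySem.Dict.empty).get? t = some (pvGrp reduced t) := by
  refine PySem.Dict.get?_of_mem_items _ ?_ (nodup_keysA reduced)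
  rw [itemsA_eq]
  exact List.mem_map_of_mem ((PySem.Set.mem_ofList _ _).2 h)

lemma mr_eq (reduced : List (Int × List (List Int))) :
    ((PySem.Set.ofList (pvE reduced)).map (fun k => (k, pvGrp reduced k))).foldl
      (fun acc kv => if (kv.2.length : Int) > acc.1 then ((kv.2.length : Int), some kv.1) else acc)
      ((0 : Int), (none : Option (List Int)))
    = (PySem.Dict.counter (pvE reduced)).items.foldl
      (fun acc kv => if kv.2 > acc.1 then (kv.2, some kv.1) else acc)
      ((0 : Int), (none : Option (List Int))) := by
  rw [PySem.Dict.items_counter, List.foldl_map, List.foldl_map]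
  refine PySem.List.foldl_congr_mem _ _ _ _ ?_
  intro acc k _
  rw [grp_len]

lemma mr_mem {l : List (List Int × Int)} :
    ∀ {acc : Int × Option (List Int)} {t : List Int},
    (l.foldl (fun acc kv => if kv.2 > acc.1 then (kv.2, some kv.1) else acc) acc).2 = some t →
    acc.2 = some t ∨ ∃ c, (t, c) ∈ l := by
  induction l with
  | nil => intro acc t h; exact Or.inl h
  | cons kv l ih =>
    intro acc t h
    rcases ih h with h' | ⟨c, hc⟩
    · by_cases hgt : kv.2 > acc.1
      · simp [hgt] at h'
        exact Or.inr ⟨kv.2, by rw [← h']; exact List.mem_cons_self⟩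
      · simp [hgt] at h'
        exact Or.inl h'
    · exact Or.inr ⟨c, List.mem_cons_of_mem _ hc⟩

def pvRm (t : List Int) (v : List (List Int)) : List (List Int) :=
  (PySem.List.remove? v t).getD v

lemma rm_cons_self (t : List Int) (v : List (List Int)) : pvRm t (t :: v) = v := by
  simp [pvRm, PySem.List.remove?, List.idxOf?_cons]

lemma rm_cons_ne (t a : List Int) (v : List (List Int)) (h : a ≠ t) :
    pvRm t (a :: v) = a :: pvRm t v := by
  simp only [pvRm, PySem.List.remove?, List.idxOf?_cons, beq_false_of_ne h]
  cases List.idxOf? t v <;> simp [List.eraseIdx]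

lemma rm_iter_cons_ne (t a : List Int) (h : a ≠ t) :
    ∀ (n : Nat) (v : List (List Int)), (pvRm t)^[n] (a :: v) = a :: (pvRm t)^[n] v := by
  intro n
  induction n with
  | zero => intro v; rfl
  | succ n ih =>
    intro v
    rw [Function.iterate_succ_apply, rm_cons_ne t a v h, ih, ← Function.iterate_succ_apply]

lemma rm_iter_count (t : List Int) (v : List (List Int)) :
    (pvRm t)^[v.count t] v = v.filter (fun e => e != t) := by
  induction v with
  | nil => rfl
  | cons a v ih =>
    by_cases h : a = t
    · subst h
      rw [List.count_cons_self, Function.iterate_succ_apply, rm_cons_self, ih,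
        List.filter_cons_of_neg (by simp)]
    · rw [List.count_cons_of_ne (by exact fun hh => h (by simpa using hh)) , rm_iter_cons_ne t a h, ih,
        List.filter_cons_of_pos (by simp [h])]

lemma getD_foldl_modify_iter (f : List (List Int) → List (List Int)) (k : Int) :
    ∀ (S : List Int) (d : PySem.Dict Int (List (List Int))),
    (S.foldl (fun d s => d.modify s [] f) d).getD k [] = f^[S.count k] (d.getD k []) := by
  intro S
  induction S with
  | nil => intro d; rfl
  | cons s S ih =>
    intro d
    rw [List.foldl_cons, ih, PySem.Dict.getD_modify]
    by_cases h : k = s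
    · subst h
      rw [List.count_cons_self, if_pos rfl, ← Function.iterate_succ_apply]
    · rw [List.count_cons_of_ne (by exact fun hh => h (by simpa using hh.symm)), if_neg h]

lemma getD_foldl_insert_const (c : List (List Int)) (k : Int) (dflt : List (List Int)) :
    ∀ (S : List Int) (d : PySem.Dict Int (List (List Int))),
    (S.foldl (fun nd s => nd.insert s c) d).getD k dflt
    = if k ∈ S then c else d.getD k dflt := by
  intro S
  induction S with
  | nil => intro d; simp
  | cons s S ih =>
    intro d
    rw [List.foldl_cons, ih, PySem.Dict.getD_insert]
    by_cases h1 : k ∈ S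
    · simp [h1]
    · by_cases h2 : k = s <;> simp [h1, h2]

lemma setUpdate_of_subset : ∀ (l : List Int) (s : PySem.Set Int), (∀ x ∈ l, x ∈ s) →
    PySem.Set.update s l = s := by
  intro l
  induction l with
  | nil => intro s _; rfl
  | cons a l ih =>
    intro s h
    have : PySem.Set.add s a = s := by
      simp [PySem.Set.add, PySem.Set.contains, h a List.mem_cons_self]
    rw [PySem.Set.update, List.foldl_cons, this, ← PySem.Set.update]
    exact ih s (fun x hx => h x (List.mem_cons_of_mem _ hx))

lemma count_flatMap_repl_zero (t : List Int) (k : Int) :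
    ∀ (l : List (Int × List (List Int))), k ∉ l.map Prod.fst →
    (l.flatMap (fun kv => List.replicate (kv.2.count t) kv.1)).count k = 0 := by
  intro l
  induction l with
  | nil => intro _; rfl
  | cons w l ih =>
    intro h
    rw [List.flatMap_cons, List.count_append, List.count_replicate,
      ih (fun hm => h (List.mem_cons_of_mem _ hm))]
    have hw : w.1 ≠ k := fun hh => h (hh ▸ List.mem_map_of_mem List.mem_cons_self)
    simp [hw]

lemma count_flatMap_repl (t : List Int) :
    ∀ (l : List (Int × List (List Int))), (l.map Prod.fst).Nodup →
    ∀ kv ∈ l, (l.flatMap (fun kv => List.replicate (kv.2.count t) kv.1)).count kv.1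
      = kv.2.count t := by
  intro l
  induction l with
  | nil => intro _ kv h; exact absurd h (List.not_mem_nil)
  | cons w l ih =>
    intro hnd kv hm
    rw [List.map_cons, List.nodup_cons] at hnd
    rw [List.flatMap_cons, List.count_append]
    rcases List.mem_cons.1 hm with h | h
    · subst h
      rw [List.count_replicate, if_pos (by simp), count_flatMap_repl_zero t kv.1 l hnd.1]
      omega
    · have hne : w.1 ≠ kv.1 := fun hh => hnd.1 (hh ▸ List.mem_map_of_mem h)
      rw [List.count_replicate, if_neg (by simpa using hne), ih hnd.2 kv h]
      omega

lemma itemsRemove_eq (reduced : List (Int × List (List Int))) (t : List Int)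
    (hnd : (reduced.map Prod.fst).Nodup) :
    ((reduced.flatMap (fun kv => List.replicate (kv.2.count t) kv.1)).foldl
      (fun d s => d.modify s [] (fun v => (PySem.List.remove? v t).getD v))
      (PySem.Dict.mk reduced)).items
    = reduced.map (fun kv => (kv.1, kv.2.filter (fun e => e != t))) := by
  set S := reduced.flatMap (fun kv => List.replicate (kv.2.count t) kv.1) with hS
  have hsub : ∀ s ∈ S, s ∈ (PySem.Dict.mk reduced).keys := by
    intro s hs
    rw [hS] at hs
    rcases List.mem_flatMap.1 hs with ⟨kv, hkv, hrep⟩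
    rw [List.eq_of_mem_replicate hrep, PySem.Dict.keys_mk]
    exact List.mem_map_of_mem hkv
  have hkeys : ((S.foldl (fun d s => d.modify s [] (fun v => (PySem.List.remove? v t).getD v))
      (PySem.Dict.mk reduced)).keys) = reduced.map Prod.fst := by
    rw [PySem.Dict.keys_foldl_modify (f := fun _ _ v => (PySem.List.remove? v t).getD v),
      setUpdate_of_subset S _ hsub, PySem.Dict.keys_mk]
  have hnd' : ((S.foldl (fun d s => d.modify s [] (fun v => (PySem.List.remove? v t).getD v))
      (PySem.Dict.mk reduced)).keys).Nodup := by rw [hkeys]; exact hnd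
  rw [PySem.Dict.items_eq_map_keys _ hnd' [], hkeys, List.map_map]
  refine List.map_congr_left ?_
  intro kv hkv
  have h1 : (PySem.Dict.mk reduced).getD kv.1 [] = kv.2 :=
    PySem.Dict.getD_of_mem_items _ (by exact hkv) (by rw [PySem.Dict.keys_mk]; exact hnd) _
  have h2 := getD_foldl_modify_iter (fun v => (PySem.List.remove? v t).getD v) kv.1 S
    (PySem.Dict.mk reduced)
  simp only [Function.comp_apply]
  rw [h2, h1, hS, count_flatMap_repl t reduced hnd kv hkv]
  have : (fun v => (PySem.List.remove? v t).getD v) = pvRm t := rfl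
  rw [this, rm_iter_count]

lemma setUpdate_append (s : PySem.Set Int) (l1 l2 : List Int) :
    PySem.Set.update s (l1 ++ l2) = PySem.Set.update (PySem.Set.update s l1) l2 :=
  List.foldl_append

lemma setUpdate_replicate (s : PySem.Set Int) (k : Int) (n : Nat) (h : k ∉ s) :
    PySem.Set.update s (List.replicate n k) = if n = 0 then s else s ++ [k] := by
  cases n with
  | zero => rfl
  | succ n =>
    rw [List.replicate_succ, PySem.Set.update, List.foldl_cons]
    have hadd : PySem.Set.add s k = s ++ [k] := by
      simp [PySem.Set.add, PySem.Set.contains]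
      intro hc
      exact absurd hc h
    rw [hadd, ← PySem.Set.update,
      setUpdate_of_subset _ _ (fun x hx => by
        rw [List.eq_of_mem_replicate hx]; exact List.mem_append_right _ List.mem_cons_self)]
    simp

lemma setUpdate_flatMap_repl (t : List Int) :
    ∀ (l : List (Int × List (List Int))) (acc : PySem.Set Int),
    (l.map Prod.fst).Nodup → (∀ w ∈ l, w.1 ∉ acc) →
    PySem.Set.update acc (l.flatMap (fun kv => List.replicate (kv.2.count t) kv.1))
    = acc ++ (l.filter (fun kv => decide (t ∈ kv.2))).map Prod.fst := by
  intro l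
  induction l with
  | nil => intro acc _ _; simp
  | cons w l ih =>
    intro acc hnd hacc
    rw [List.map_cons, List.nodup_cons] at hnd
    rw [List.flatMap_cons, setUpdate_append,
      setUpdate_replicate acc w.1 _ (hacc w List.mem_cons_self)]
    by_cases hmem : t ∈ w.2
    · have hn : ¬ (w.2.count t = 0) := by
        simpa [List.count_eq_zero] using hmem
      rw [if_neg hn, ih (acc ++ [w.1]) hnd.2 ?_]
      · rw [List.filter_cons_of_pos (by simpa using hmem), List.map_cons]
        simp
      · intro w' hw'
        rw [List.mem_append]
        rintro (h | h)
        · exact hacc w' (List.mem_cons_of_mem _ hw') h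
        · have he : w'.1 = w.1 := by simpa using h
          exact hnd.1 (he ▸ List.mem_map_of_mem hw')
    · have hn : w.2.count t = 0 := List.count_eq_zero.2 hmem
      rw [if_pos hn, ih acc hnd.2 (fun w' hw' => hacc w' (List.mem_cons_of_mem _ hw')),
        List.filter_cons_of_neg (by simpa using hmem)]

lemma itemsNew_eq (reduced : List (Int × List (List Int))) (t : List Int)
    (hnd : (reduced.map Prod.fst).Nodup) :
    ((reduced.flatMap (fun kv => List.replicate (kv.2.count t) kv.1)).foldl
      (fun nd s => nd.insert s [t]) PySem.Dict.empty).items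
    = (reduced.filter (fun kv => decide (t ∈ kv.2))).map (fun kv => (kv.1, [t])) := by
  set S := reduced.flatMap (fun kv => List.replicate (kv.2.count t) kv.1) with hS
  have hkeys : ((S.foldl (fun nd s => nd.insert s [t]) PySem.Dict.empty).keys)
      = (reduced.filter (fun kv => decide (t ∈ kv.2))).map Prod.fst := by
    rw [PySem.Dict.keys_foldl_insert (f := fun _ _ => [t]), hS]
    have := setUpdate_flatMap_repl t reduced (PySem.Dict.empty (κ := Int) (ν := List (List Int))).keys hnd (by intro w _; simp [PySem.Dict.empty, PySem.Dict.keys])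
    simpa [PySem.Dict.empty, PySem.Dict.keys] using this
  have hnd' : ((S.foldl (fun nd s => nd.insert s [t]) PySem.Dict.empty).keys).Nodup :=
    PySem.Dict.nodup_keys_foldl_insert _ _ _ (by simp [PySem.Dict.empty, PySem.Dict.keys])
  rw [PySem.Dict.items_eq_map_keys _ hnd' [], hkeys, List.map_map]
  refine List.map_congr_left ?_
  intro kv hkv
  rw [List.mem_filter] at hkv
  have hmemS : kv.1 ∈ S := by
    rw [hS]
    refine List.mem_flatMap.2 ⟨kv, hkv.1, ?_⟩
    rw [List.mem_replicate]
    refine ⟨?_, rfl⟩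
    simpa [List.count_eq_zero] using (by simpa using hkv.2 : t ∈ kv.2)
  simp only [Function.comp_apply]
  rw [getD_foldl_insert_const, if_pos hmemS]

lemma altFold_eq (reduced : List (Int × List (List Int))) (t : List Int) :
    (reduced.foldl (fun acc kv =>
      if t ∈ kv.2 then
        (acc.1 ++ [(kv.1, kv.2.filter (fun e => e != t))], acc.2 ++ [(kv.1, [t])])
      else (acc.1 ++ [kv], acc.2)) ([], []))
    = (reduced.map (fun kv => (kv.1, kv.2.filter (fun e => e != t))),
       (reduced.filter (fun kv => decide (t ∈ kv.2))).map (fun kv => (kv.1, [t]))) := by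
  have hstep : (fun (acc : List (Int × List (List Int)) × List (Int × List (List Int))) kv =>
      if t ∈ kv.2 then
        (acc.1 ++ [(kv.1, kv.2.filter (fun e => e != t))], acc.2 ++ [(kv.1, [t])])
      else (acc.1 ++ [kv], acc.2))
      = fun acc kv =>
        (acc.1 ++ [if t ∈ kv.2 then (kv.1, kv.2.filter (fun e => e != t)) else kv],
         if t ∈ kv.2 then acc.2 ++ [(kv.1, [t])] else acc.2) := by
    funext acc kv
    by_cases h : t ∈ kv.2 <;> simp [h]
  have hpm := PySem.List.foldl_prod_mk
      (fun (a : List (Int × List (List Int))) kv =>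
        a ++ [if t ∈ kv.2 then (kv.1, kv.2.filter (fun e => e != t)) else kv])
      (fun (a : List (Int × List (List Int))) kv => if t ∈ kv.2 then a ++ [(kv.1, [t])] else a)
      reduced [] []
  have hai := PySem.List.foldl_append_ite (fun kv : Int × List (List Int) => t ∈ kv.2)
      (fun kv => (kv.1, [t])) reduced []
  rw [hstep, hpm, PySem.List.foldl_append_singleton_eq_map, hai]
  rw [List.nil_append, List.nil_append]
  refine Prod.ext ?_ rfl
  simp only []
  refine List.map_congr_left ?_
  intro kv _
  by_cases h : t ∈ kv.2
  · rw [if_pos h]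
  · rw [if_neg h, List.filter_eq_self.2 (fun e he => by
      simp only [bne_iff_ne, ne_eq]
      exact fun hh => h (hh ▸ he))]

theorem ports_eq (reduced : List (Int × List (List Int)))
    (hnd : (reduced.map Prod.fst).Nodup) :
    removeMaxElement reduced = removeMaxElement_alt reduced := by
  simp only [removeMaxElement, removeMaxElement_alt, countA_eq, countB_eq, itemsA_eq, mr_eq]
  cases hm : ((PySem.Dict.counter (pvE reduced)).items.foldl
      (fun acc kv => if kv.2 > acc.1 then (kv.2, some kv.1) else acc)
      ((0 : Int), (none : Option (List Int)))).2 with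
  | none => rfl
  | some t =>
    have ht : t ∈ pvE reduced := by
      rcases mr_mem hm with h | ⟨c, hc⟩
      · exact absurd h (by simp)
      · rw [PySem.Dict.items_counter] at hc
        rcases List.mem_map.1 hc with ⟨k, hk, hke⟩
        have : k = t := congrArg Prod.fst hke
        exact (PySem.Set.mem_ofList _ _).1 (this ▸ hk)
    dsimp only []
    rw [get?A_eq reduced t ht]
    dsimp only []
    rw [grp_eq, itemsRemove_eq _ _ hnd, itemsNew_eq _ _ hnd, altFold_eq]

-- ===== VERDICT (by name: the statement is the Claim_ definition above) =====
theorem removeMaxElement_spec : Claim_equal_removeMaxElement := by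
  intro reduced _ hpre
  unfold Spec_removeMaxElement
  exact ports_eq reduced hpre.1
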